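-- pv_equiv track=rewrite | github.com/Zetao-Miao/CRYPT_Arithmetic | RTL_gen.py | reg_flag_list_gen
-- ===== SOURCE A (Python) =====
-- def reg_flag_list_gen(pipeline_stages: int, num_layers: int) -> list[bool]:
--     reg_flag_list = [False] * num_layers
--     base = num_layers // pipeline_stages
--     remainder = num_layers % pipeline_stages
--     idx = 0
--     for stage in range(pipeline_stages):
--         group_size = base + (1 if stage < remainder else 0)
--         idx += group_size
--         reg_flag_list[idx-1] = True
--     return reg_flag_list
-- ===== SOURCE B (Python) =====
-- def reg_flag_list_gen(pipeline_stages: int, num_layers: int) -> list[bool]: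
--     base, remainder = divmod(num_layers, pipeline_stages)
--     cuts = {base * (s + 1) + min(s + 1, remainder) - 1 for s in range(pipeline_stages)}
--     return [i in cuts for i in range(num_layers)]
-- ===== Notes on version B (the rewrite author's own statement) =====
-- stated objective: alternative
-- what changed: B replaces A's accumulator-carrying loop that mutates the list in place with a closed-form computation: it builds the set of boundary indices base*(s+1)+min(s+1,remainder)-1 and constructs the result by a membership comprehension over range(num_layers).
import Mathlib
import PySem

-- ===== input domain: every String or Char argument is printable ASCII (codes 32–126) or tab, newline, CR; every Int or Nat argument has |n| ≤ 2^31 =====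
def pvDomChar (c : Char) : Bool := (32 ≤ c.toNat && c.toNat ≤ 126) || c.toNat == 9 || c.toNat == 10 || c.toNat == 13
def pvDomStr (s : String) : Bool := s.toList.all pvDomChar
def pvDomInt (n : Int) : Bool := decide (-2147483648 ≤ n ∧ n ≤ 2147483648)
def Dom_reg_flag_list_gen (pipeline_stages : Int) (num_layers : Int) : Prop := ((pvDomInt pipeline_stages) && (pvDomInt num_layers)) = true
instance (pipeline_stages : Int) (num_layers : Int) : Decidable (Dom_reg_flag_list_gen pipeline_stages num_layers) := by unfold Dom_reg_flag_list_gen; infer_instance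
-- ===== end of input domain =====

-- B replaces A's accumulator-carrying in-place-mutation loop by a boundary-index set and a
-- membership comprehension (alternative decomposition, same cost); where A raises (IndexError /
-- ZeroDivisionError) nothing is claimed (those inputs are outside Pre_).


-- ===== PORT A =====
def reg_flag_list_gen (pipeline_stages : Int) (num_layers : Int) : List Bool :=
  -- [False] * num_layers ([] when num_layers ≤ 0; exact)
  let reg_flag_list : List Bool := List.replicate num_layers.toNat false
  let base := PySem.Int.floordiv num_layers pipeline_stages      -- pipeline_stages ≠ 0 in Pre_
  let remainder := PySem.Int.mod num_layers pipeline_stages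
  let st := (PySem.List.pyRange 0 pipeline_stages 1).foldl
    (fun (st : Int × List Bool) stage =>
      let group_size := base + (if stage < remainder then 1 else 0)
      let idx := st.1 + group_size
      -- reg_flag_list[idx-1] = True ; in range under Pre_ (pySetD)
      (idx, PySem.List.pySetD st.2 (idx - 1) true))
    (0, reg_flag_list)
  st.2

-- ===== PORT B =====
def reg_flag_list_gen_alt (pipeline_stages : Int) (num_layers : Int) : List Bool :=
  let base := PySem.Int.floordiv num_layers pipeline_stages
  let remainder := PySem.Int.mod num_layers pipeline_stages
  let cuts : PySem.Set Int := PySem.Set.ofList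
    ((PySem.List.pyRange 0 pipeline_stages 1).map
      (fun s => base * (s + 1) + min (s + 1) remainder - 1))
  (PySem.List.pyRange 0 num_layers 1).map (fun i => PySem.Set.contains cuts i)

-- ===== PRECONDITION & SPEC =====
-- Pre_ excludes exactly the inputs where A raises: pipeline_stages = 0 (ZeroDivisionError) and
-- pipeline_stages > 0 with num_layers ≤ 0 (IndexError on the empty list).
def Pre_reg_flag_list_gen (pipeline_stages : Int) (num_layers : Int) : Prop :=
  pipeline_stages ≠ 0 ∧ (0 < pipeline_stages → 0 < num_layers)
instance (pipeline_stages : Int) (num_layers : Int) : Decidable (Pre_reg_flag_list_gen pipeline_stages num_layers) := by unfold Pre_reg_flag_list_gen; infer_instance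

def pvWitness_reg_flag_list_gen : Int × Int := (3, 10)

def Spec_reg_flag_list_gen (pipeline_stages : Int) (num_layers : Int) (out : List Bool) : Prop := out = reg_flag_list_gen_alt pipeline_stages num_layers
instance (pipeline_stages : Int) (num_layers : Int) (out : List Bool) : Decidable (Spec_reg_flag_list_gen pipeline_stages num_layers out) := by unfold Spec_reg_flag_list_gen; infer_instance

-- ===== CLAIM (what is proved, stated in full; the proofs are below) =====
def Claim_equal_reg_flag_list_gen : Prop := ∀ (pipeline_stages : Int) (num_layers : Int), Dom_reg_flag_list_gen pipeline_stages num_layers → Pre_reg_flag_list_gen pipeline_stages num_layers → Spec_reg_flag_list_gen pipeline_stages num_layers (reg_flag_list_gen pipeline_stages num_layers)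

-- ===== LEMMAS AND PROOFS =====

-- A's accumulator loop over the first n stages: the carried idx is the closed form
-- b*n + min n r, and the list part is a plain fold of in-place sets at the closed-form indices.
lemma regA_loop (b r : Int) (hr : 0 ≤ r) (n : Nat) (l0 : List Bool) :
    (PySem.List.pyRange 0 (n : Int) 1).foldl
      (fun (st : Int × List Bool) stage =>
        (st.1 + (b + if stage < r then 1 else 0),
         PySem.List.pySetD st.2 (st.1 + (b + if stage < r then 1 else 0) - 1) true))
      (0, l0)
    = (b * (n : Int) + min (n : Int) r,
       ((PySem.List.pyRange 0 (n : Int) 1).map (fun s => b * (s + 1) + min (s + 1) r - 1)).foldl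
         (fun l p => PySem.List.pySetD l p true) l0) := by
  induction n with
  | zero => simp [PySem.List.pyRange_one_eq_nil]; omega
  | succ n ih =>
    have hcast : ((n + 1 : Nat) : Int) = (n : Int) + 1 := by push_cast; ring
    rw [hcast, PySem.List.pyRange_one_succ_right (by positivity), List.foldl_append,
        List.map_append, List.foldl_append, ih]
    have hidx : b * (n : Int) + min (n : Int) r + (b + (if (n : Int) < r then 1 else 0))
        = b * ((n : Int) + 1) + min ((n : Int) + 1) r := by
      have : b * ((n : Int) + 1) = b * (n : Int) + b := by ring
      rw [this]; omega
    simp only [List.foldl_cons, List.foldl_nil, List.map_cons, List.map_nil]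
    rw [← hidx]

-- a fold of in-range in-place sets, looked up positionally: True at the set positions
lemma getElem?_foldl_pySetD (P : List Int) (l0 : List Bool)
    (hP : ∀ p ∈ P, 0 ≤ p ∧ p < (l0.length : Int)) (j : Nat) :
    (P.foldl (fun l p => PySem.List.pySetD l p true) l0)[j]? =
      if (j : Int) ∈ P then some true else l0[j]? := by
  induction P generalizing l0 with
  | nil => simp
  | cons p P ih =>
    have hp := hP p (List.mem_cons_self ..)
    have hset : PySem.List.pySetD l0 p true = l0.set p.toNat true :=
      PySem.List.pySetD_of_nonneg _ _ hp.1
    have hlen : (PySem.List.pySetD l0 p true).length = l0.length :=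
      PySem.List.length_pySetD ..
    rw [List.foldl_cons, ih _ (fun q hq => by rw [hlen]; exact hP q (List.mem_cons_of_mem _ hq))]
    by_cases hjP : (j : Int) ∈ P
    · simp [hjP]
    · by_cases hjp : p = (j : Int)
      · have hj : j < l0.length := by omega
        simp [hjP, hjp, hj]
      · have : (j : Int) ∉ p :: P := by simp [hjP]; omega
        simp [hjP, this, hset, show p.toNat ≠ j by omega]

-- the closed-form stage-boundary indices are in range (pure arithmetic on b = nl//ps, r = nl%ps)
lemma reg_pos_in_range (b r ps nl s : Int) (hps : 0 < ps) (hnl : 0 < nl)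
    (hsum : b * ps + r = nl) (hr0 : 0 ≤ r) (hrlt : r < ps) (hs : 0 ≤ s) (hs' : s < ps) :
    0 ≤ b * (s + 1) + min (s + 1) r - 1 ∧ b * (s + 1) + min (s + 1) r - 1 < nl := by
  have hb0 : 0 ≤ b := by
    by_contra h
    have h1 : b ≤ -1 := by omega
    have : b * ps ≤ -1 * ps := mul_le_mul_of_nonneg_right h1 (le_of_lt hps)
    omega
  have h2 : b * (s + 1) ≤ b * ps := mul_le_mul_of_nonneg_left (by omega) hb0
  rcases eq_or_ne b 0 with hb1 | hb1
  · simp only [hb1, zero_mul, zero_add] at *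
    omega
  · have h1 : b ≤ b * (s + 1) := by
      calc b = b * 1 := (mul_one b).symm
        _ ≤ b * (s + 1) := mul_le_mul_of_nonneg_left (by omega) hb0
    omega

-- ===== VERDICT (by name: the statement is the Claim_ definition above) =====
theorem reg_flag_list_gen_spec : Claim_equal_reg_flag_list_gen := by
  intro ps nl _ hpre
  unfold Spec_reg_flag_list_gen reg_flag_list_gen reg_flag_list_gen_alt
  obtain ⟨hps0, hpos⟩ := hpre
  simp only []
  by_cases hps : 0 < ps
  · -- pipeline_stages > 0, num_layers > 0
    have hnl : 0 < nl := hpos hps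
    obtain ⟨m, rfl⟩ := Int.eq_ofNat_of_zero_le (le_of_lt hps)
    have hr0 : 0 ≤ PySem.Int.mod nl (m : Int) := PySem.Int.mod_nonneg nl hps
    rw [regA_loop _ _ hr0 m (List.replicate nl.toNat false)]
    set b := PySem.Int.floordiv nl (m : Int) with hb
    set r := PySem.Int.mod nl (m : Int) with hrr
    set P := ((PySem.List.pyRange 0 ((m : Nat) : Int) 1).map
      (fun s => b * (s + 1) + min (s + 1) r - 1)) with hP
    have hlenrep : (List.replicate nl.toNat false).length = nl.toNat := List.length_replicate
    have hPr : ∀ p ∈ P, 0 ≤ p ∧ p < nl := by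
      intro p hp
      rw [hP] at hp
      obtain ⟨s, hs, rfl⟩ := List.mem_map.mp hp
      rw [PySem.List.mem_pyRange_one] at hs
      exact reg_pos_in_range b r (m : Int) nl s hps hnl
        (PySem.Int.floordiv_mul_add_mod nl (m : Int))
        hr0 (PySem.Int.mod_lt nl hps) hs.1 (by omega)
    have hPr' : ∀ p ∈ P, 0 ≤ p ∧ p < ((List.replicate nl.toNat false).length : Int) := by
      intro p hp
      have := hPr p hp
      rw [hlenrep]
      omega
    apply List.ext_getElem?
    intro j
    rw [getElem?_foldl_pySetD P _ hPr' j]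
    have hlenB : ((PySem.List.pyRange 0 nl 1).map
        (fun i => PySem.Set.contains (PySem.Set.ofList P) i)).length = nl.toNat := by
      simp [PySem.List.length_pyRange_one]
    by_cases hj : j < nl.toNat
    · have hgetB : ((PySem.List.pyRange 0 nl 1).map
          (fun i => PySem.Set.contains (PySem.Set.ofList P) i))[j]? =
          some (PySem.Set.contains (PySem.Set.ofList P) (j : Int)) := by
        rw [List.getElem?_eq_getElem (by omega)]
        rw [List.getElem_map, PySem.List.getElem_pyRange_one]
        simp
      rw [hgetB]
      by_cases hmem : (j : Int) ∈ P
      · have hc : PySem.Set.contains (PySem.Set.ofList P) (j : Int) = true := by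
          rw [PySem.Set.contains_iff, PySem.Set.mem_ofList]; exact hmem
        simp [hmem]
      · have hc : PySem.Set.contains (PySem.Set.ofList P) (j : Int) = false := by
          rw [Bool.eq_false_iff]
          intro h
          rw [PySem.Set.contains_iff, PySem.Set.mem_ofList] at h
          exact hmem h
        simp [hmem, hj]
    · have hA : (j : Int) ∉ P := by
        intro h
        have := hPr _ h
        omega
      rw [List.getElem?_eq_none (show (List.replicate nl.toNat false).length ≤ j by
            rw [hlenrep]; omega),
          List.getElem?_eq_none (by rw [hlenB]; omega)]
      simp [hA]
  · -- pipeline_stages < 0: the loop body never runs; everything stays False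
    have hnil : PySem.List.pyRange 0 ps 1 = [] := PySem.List.pyRange_one_eq_nil (by omega)
    simp only [hnil, List.map_nil, List.foldl_nil]
    have hlenB : ((PySem.List.pyRange 0 nl 1).map
        (fun i => PySem.Set.contains (PySem.Set.ofList ([] : List Int)) i)).length
        = nl.toNat := by
      simp [PySem.List.length_pyRange_one]
    apply List.ext_getElem?
    intro j
    by_cases hj : j < nl.toNat
    · rw [List.getElem?_eq_getElem (by rw [List.length_replicate]; omega),
          List.getElem?_eq_getElem (by rw [hlenB]; omega)]
      simp [PySem.Set.ofList, PySem.Set.contains]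
    · rw [List.getElem?_eq_none (by rw [List.length_replicate]; omega),
          List.getElem?_eq_none (show _ ≤ j by rw [hlenB]; omega)]
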